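-- pv_equiv track=rewrite | github.com/jylxy/jy_option | src/spot_provider.py | spot_tables_for_codes
-- ===== SOURCE A (Python) =====
-- FUTURE_MINUTE_TABLE = "future_hf_1min"
--
-- ETF_MINUTE_TABLE = "etf_hf_1min_non_ror"
--
-- def spot_tables_for_codes(underlying_codes, future_table=FUTURE_MINUTE_TABLE,
--                           etf_table=ETF_MINUTE_TABLE):
--     codes = [str(code) for code in underlying_codes if code]
--     if not codes:
--         return []
--     code_suffixes = {code.rsplit(".", 1)[-1] if "." in code else "" for code in codes}
--     if code_suffixes and code_suffixes.issubset({"SH", "SZ"}):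
--         return [etf_table]
--     if code_suffixes.isdisjoint({"SH", "SZ"}):
--         return [future_table]
--     return [future_table, etf_table]
-- ===== SOURCE B (Python) =====
-- FUTURE_MINUTE_TABLE = "future_hf_1min"
--
-- ETF_MINUTE_TABLE = "etf_hf_1min_non_ror"
--
-- def spot_tables_for_codes(underlying_codes, future_table=FUTURE_MINUTE_TABLE,
--                           etf_table=ETF_MINUTE_TABLE):
--     codes = [str(code) for code in underlying_codes if code]
--     n_etf = sum(code.endswith((".SH", ".SZ")) for code in codes)
--     tables = []
--     if n_etf < len(codes):
--         tables.append(future_table)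
--     if n_etf > 0:
--         tables.append(etf_table)
--     return tables
-- ===== Notes on version B (the rewrite author's own statement) =====
-- stated objective: simpler
-- what changed: Replaces per-code rsplit suffix extraction collected into a set with subset/disjoint algebra by counting codes that end with '.SH'/'.SZ' and assembling the result list from two count comparisons (k < n, k > 0), with no early return and no branch cascade.
import Mathlib
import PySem

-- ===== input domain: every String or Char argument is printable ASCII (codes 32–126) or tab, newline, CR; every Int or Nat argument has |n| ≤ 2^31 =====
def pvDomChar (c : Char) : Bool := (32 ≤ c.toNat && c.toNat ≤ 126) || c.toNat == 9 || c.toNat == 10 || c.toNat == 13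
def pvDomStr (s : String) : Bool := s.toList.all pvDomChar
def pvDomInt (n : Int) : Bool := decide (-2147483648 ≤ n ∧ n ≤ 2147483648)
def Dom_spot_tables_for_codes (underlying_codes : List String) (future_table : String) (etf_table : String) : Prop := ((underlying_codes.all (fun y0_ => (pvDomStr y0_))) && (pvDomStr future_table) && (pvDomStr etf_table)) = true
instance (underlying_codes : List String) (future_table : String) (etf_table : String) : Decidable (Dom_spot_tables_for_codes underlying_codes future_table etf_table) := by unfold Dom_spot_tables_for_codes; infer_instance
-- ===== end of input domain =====

-- B counts codes ending in ".SH"/".SZ" and builds the result from two count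
-- comparisons, instead of A's rsplit-suffix set plus subset/disjoint tests; objective: simpler.

-- ===== PORT A =====
-- hand port of `code.rsplit(".", 1)[-1]`: with maxsplit = 1 and taking the LAST piece,
-- this is exactly the characters after the last '.', which this fold computes (exact).
def pvAfterLastDot (cs : List Char) : List Char :=
  cs.foldl (fun acc c => if c = '.' then [] else acc ++ [c]) []

-- `code.rsplit(".", 1)[-1] if "." in code else ""`
def pvSuffix (code : String) : String :=
  if PySem.Str.isIn "." code then String.ofList (pvAfterLastDot code.toList) else ""

def spot_tables_for_codes (underlying_codes : List String) (future_table : String) (etf_table : String) : List String :=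
  let codes := underlying_codes.filter (fun c => c ≠ "")
  if codes = [] then []
  else
    let code_suffixes := PySem.Set.ofList (codes.map pvSuffix)
    if !code_suffixes.isEmpty && PySem.Set.issubset code_suffixes (PySem.Set.ofList ["SH", "SZ"]) then
      [etf_table]
    else if PySem.Set.isdisjoint code_suffixes (PySem.Set.ofList ["SH", "SZ"]) then
      [future_table]
    else
      [future_table, etf_table]

-- ===== PORT B =====
-- `sum(code.endswith((".SH", ".SZ")) for code in codes)` (True counts as 1)
def pvCountEtf (codes : List String) : Int :=
  codes.foldl
    (fun acc c => acc + (if PySem.Str.endswith c ".SH" || PySem.Str.endswith c ".SZ" then 1 else 0)) 0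

def spot_tables_for_codes_alt (underlying_codes : List String) (future_table : String) (etf_table : String) : List String :=
  let codes := underlying_codes.filter (fun c => c ≠ "")
  let n_etf := pvCountEtf codes
  (if n_etf < (codes.length : Int) then [future_table] else []) ++
  (if 0 < n_etf then [etf_table] else [])

-- ===== PRECONDITION & SPEC =====
def Spec_spot_tables_for_codes (underlying_codes : List String) (future_table : String) (etf_table : String) (out : List String) : Prop := out = spot_tables_for_codes_alt underlying_codes future_table etf_table
instance (underlying_codes : List String) (future_table : String) (etf_table : String) (out : List String) : Decidable (Spec_spot_tables_for_codes underlying_codes future_table etf_table out) := by unfold Spec_spot_tables_for_codes; infer_instance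

-- ===== CLAIM (what is proved, stated in full; the proofs are below) =====
def Claim_equal_spot_tables_for_codes : Prop := ∀ (underlying_codes : List String) (future_table : String) (etf_table : String), Dom_spot_tables_for_codes underlying_codes future_table etf_table → Spec_spot_tables_for_codes underlying_codes future_table etf_table (spot_tables_for_codes underlying_codes future_table etf_table)

-- ===== LEMMAS AND PROOFS =====
def pvIsE (s : String) : Bool := s == "SH" || s == "SZ"

def pvEnds (c : String) : Bool := PySem.Str.endswith c ".SH" || PySem.Str.endswith c ".SZ"

-- pvAfterLastDot is the reversed run of non-dot characters at the end
theorem pvALD_eq (cs : List Char) :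
    pvAfterLastDot cs = (cs.reverse.takeWhile (fun c => c != '.')).reverse := by
  induction cs using List.reverseRecOn with
  | nil => rfl
  | append_singleton cs c ih =>
    unfold pvAfterLastDot at ih ⊢
    rw [List.foldl_append]
    simp only [List.foldl_cons, List.foldl_nil, List.reverse_append, List.reverse_cons,
      List.reverse_nil, List.nil_append, List.cons_append, List.takeWhile_cons, bne_iff_ne]
    by_cases hc : c = '.'
    · simp [hc]
    · simp [hc, ih]

theorem takeWhile_core (r : List Char) (x y : Char) (hx : x ≠ '.') (hy : y ≠ '.') :
    ('.' ∈ r ∧ r.takeWhile (fun c => c != '.') = [y, x]) ↔ [y, x, '.'] <+: r := by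
  cases r with
  | nil => simp
  | cons a r1 =>
    cases r1 with
    | nil =>
      constructor
      · rintro ⟨hm, ht⟩
        by_cases ha : a = '.' <;> simp [List.takeWhile_cons, bne_iff_ne, ha] at ht
      · intro h
        rcases h with ⟨t, ht⟩
        simp at ht
    | cons b r2 =>
      cases r2 with
      | nil =>
        constructor
        · rintro ⟨hm, ht⟩
          by_cases ha : a = '.'
          · simp [List.takeWhile_cons, bne_iff_ne, ha] at ht
          · by_cases hb : b = '.' <;> simp [List.takeWhile_cons, bne_iff_ne, ha, hb] at ht
            rcases ht with ⟨h1, h2⟩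
            subst h1; subst h2
            simp at hm
            rcases hm with h | h
            · exact (hy h.symm).elim
            · exact (hx h.symm).elim
        · intro h
          rcases h with ⟨t, ht⟩
          simp at ht
      | cons c r3 =>
        have hpre : ([y, x, '.'] <+: a :: b :: c :: r3) ↔ (a = y ∧ b = x ∧ c = '.') := by
          constructor
          · rintro ⟨t, ht⟩
            simp at ht
            exact ⟨ht.1.symm, ht.2.1.symm, ht.2.2.1.symm⟩
          · rintro ⟨h1, h2, h3⟩
            subst h1; subst h2; subst h3
            exact ⟨r3, rfl⟩
        rw [hpre]
        constructor
        · rintro ⟨hm, ht⟩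
          by_cases ha : a = '.'
          · simp [List.takeWhile_cons, bne_iff_ne, ha] at ht
          · by_cases hb : b = '.'
            · simp [List.takeWhile_cons, bne_iff_ne, ha, hb] at ht
            · by_cases hc : c = '.'
              · simp [List.takeWhile_cons, bne_iff_ne, ha, hb, hc] at ht
                exact ⟨ht.1, ht.2, hc⟩
              · simp [List.takeWhile_cons, bne_iff_ne, ha, hb, hc] at ht
        · rintro ⟨h1, h2, h3⟩
          subst h1; subst h2; subst h3
          refine ⟨by simp, ?_⟩
          simp [List.takeWhile_cons, bne_iff_ne, hx, hy]

-- the per-code predicates agree: suffix-after-last-dot ∈ {SH, SZ} ⟺ endswith ".SH"/".SZ"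
theorem pred_eq (code : String) : pvIsE (pvSuffix code) = pvEnds code := by
  rw [Bool.eq_iff_iff]
  unfold pvIsE pvSuffix pvEnds
  by_cases hdot : PySem.Str.isIn "." code = true
  · have hm : '.' ∈ code.toList := by
      have := (PySem.Str.isIn_iff_infix "." code).mp hdot
      rcases this with ⟨s, t, hst⟩
      rw [← hst]; simp
    rw [if_pos hdot, pvALD_eq]
    have hSH : (String.ofList (code.toList.reverse.takeWhile (fun c => c != '.')).reverse == ("SH" : String)) = true
        ↔ code.toList.reverse.takeWhile (fun c => c != '.') = ['H', 'S'] := by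
      constructor
      · intro h
        have h2 : (code.toList.reverse.takeWhile (fun c => c != '.')).reverse = "SH".toList := by
          have h3 := congrArg String.toList (beq_iff_eq.mp h)
          simpa using h3
        have := congrArg List.reverse h2
        simpa using this
      · intro h
        rw [h]
        rfl
    have hSZ : (String.ofList (code.toList.reverse.takeWhile (fun c => c != '.')).reverse == ("SZ" : String)) = true
        ↔ code.toList.reverse.takeWhile (fun c => c != '.') = ['Z', 'S'] := by
      constructor
      · intro h
        have h2 : (code.toList.reverse.takeWhile (fun c => c != '.')).reverse = "SZ".toList := by
          have h3 := congrArg String.toList (beq_iff_eq.mp h)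
          simpa using h3
        have := congrArg List.reverse h2
        simpa using this
      · intro h
        rw [h]
        rfl
    have hmr : '.' ∈ code.toList.reverse := by simpa using hm
    have eSH : PySem.Str.endswith code ".SH" = true ↔ ['H', 'S', '.'] <+: code.toList.reverse := by
      rw [PySem.Str.endswith_eq, PySem.Chars.endswith_iff]
      show (".SH".toList <:+ code.toList) ↔ _
      rw [← List.reverse_prefix]
      rfl
    have eSZ : PySem.Str.endswith code ".SZ" = true ↔ ['Z', 'S', '.'] <+: code.toList.reverse := by
      rw [PySem.Str.endswith_eq, PySem.Chars.endswith_iff]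
      show (".SZ".toList <:+ code.toList) ↔ _
      rw [← List.reverse_prefix]
      rfl
    simp only [Bool.or_eq_true, hSH, hSZ, eSH, eSZ]
    rw [← takeWhile_core _ 'S' 'H' (by decide) (by decide),
        ← takeWhile_core _ 'S' 'Z' (by decide) (by decide)]
    constructor
    · rintro (h | h) <;> [exact Or.inl ⟨hmr, h⟩; exact Or.inr ⟨hmr, h⟩]
    · rintro (⟨_, h⟩ | ⟨_, h⟩) <;> [exact Or.inl h; exact Or.inr h]
  · rw [if_neg hdot]
    have hnm : ¬ ('.' ∈ code.toList) := by
      intro hm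
      apply hdot
      rw [PySem.Str.isIn_iff_infix]
      rcases List.append_of_mem hm with ⟨s, t, hst⟩
      exact ⟨s, t, by rw [hst]; simp⟩
    constructor
    · intro h; simp at h
    · intro h
      exfalso
      have h'' : PySem.Str.endswith code ".SH" = true ∨ PySem.Str.endswith code ".SZ" = true := by
        simpa using h
      rcases h'' with h' | h' <;>
      · rw [PySem.Str.endswith_eq, PySem.Chars.endswith_iff] at h'
        rcases h' with ⟨p, hp⟩
        apply hnm
        rw [← hp]
        simp

theorem pvCountEtf_eq (codes : List String) :
    pvCountEtf codes = (codes.countP pvEnds : Int) := by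
  unfold pvCountEtf
  have : ∀ (a : Int), codes.foldl
      (fun acc c => acc + (if PySem.Str.endswith c ".SH" || PySem.Str.endswith c ".SZ" then 1 else 0)) a
      = a + (codes.countP pvEnds : Int) := by
    induction codes with
    | nil => intro a; simp
    | cons x xs ih =>
      intro a
      simp only [List.foldl_cons, List.countP_cons, ih]
      unfold pvEnds
      split_ifs with h <;> simp [h] <;> push_cast <;> ring
  simpa using this 0

theorem issubset_SHSZ (xs : List String) :
    PySem.Set.issubset (PySem.Set.ofList xs) (PySem.Set.ofList ["SH", "SZ"]) = xs.all pvIsE := by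
  by_cases h : xs.all pvIsE = true
  · rw [h, PySem.Set.issubset_iff]
    intro x hx
    rw [PySem.Set.mem_ofList] at hx ⊢
    have := List.all_eq_true.mp h x hx
    simp only [pvIsE, Bool.or_eq_true, beq_iff_eq] at this
    rcases this with h' | h' <;> simp [h']
  · have h' := eq_false_of_ne_true h
    rw [List.all_eq_false] at h'
    obtain ⟨x, hx, hxe⟩ := h'
    rw [eq_false_of_ne_true h, ← Bool.not_eq_true, PySem.Set.issubset_iff]
    intro hc
    have hm := hc x ((PySem.Set.mem_ofList _ _).mpr hx)
    rw [PySem.Set.mem_ofList] at hm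
    simp only [List.mem_cons, List.not_mem_nil, or_false] at hm
    apply hxe
    rcases hm with h2 | h2 <;> simp [pvIsE, h2]

theorem isdisjoint_SHSZ (xs : List String) :
    PySem.Set.isdisjoint (PySem.Set.ofList xs) (PySem.Set.ofList ["SH", "SZ"]) = xs.all (fun s => !pvIsE s) := by
  by_cases h : xs.all (fun s => !pvIsE s) = true
  · rw [h, PySem.Set.isdisjoint_iff]
    intro x hx
    rw [PySem.Set.mem_ofList] at hx
    rw [PySem.Set.mem_ofList]
    have := List.all_eq_true.mp h x hx
    simp only [Bool.not_eq_eq_eq_not, Bool.not_true, pvIsE, Bool.or_eq_false_iff, beq_eq_false_iff_ne, ne_eq] at this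
    simp [this.1, this.2]
  · have h' := eq_false_of_ne_true h
    rw [List.all_eq_false] at h'
    obtain ⟨x, hx, hxe⟩ := h'
    rw [eq_false_of_ne_true h, ← Bool.not_eq_true, PySem.Set.isdisjoint_iff]
    intro hc
    have hm := hc x ((PySem.Set.mem_ofList _ _).mpr hx)
    rw [PySem.Set.mem_ofList] at hm
    simp only [Bool.not_eq_true', Bool.not_eq_false] at hxe
    simp only [pvIsE, Bool.or_eq_true, beq_iff_eq] at hxe
    rcases hxe with h2 | h2 <;> exact hm (by simp [h2])

theorem ofList_isEmpty (xs : List String) :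
    (PySem.Set.ofList xs).isEmpty = xs.isEmpty := by
  cases xs with
  | nil => simp [PySem.Set.ofList]
  | cons x xs =>
    have hx : x ∈ PySem.Set.ofList (x :: xs) := (PySem.Set.mem_ofList _ _).mpr List.mem_cons_self
    cases hS : PySem.Set.ofList (x :: xs) with
    | nil => rw [hS] at hx; simp at hx
    | cons a as => simp

-- ===== VERDICT (by name: the statement is the Claim_ definition above) =====
theorem spot_tables_for_codes_spec : Claim_equal_spot_tables_for_codes := by
  intro u ft et _
  unfold Spec_spot_tables_for_codes spot_tables_for_codes spot_tables_for_codes_alt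
  simp only [pvCountEtf_eq]
  set cs := u.filter (fun c => c ≠ "") with hcs
  have hcnt : cs.countP pvEnds = cs.countP (fun c => pvIsE (pvSuffix c)) := by
    apply List.countP_congr
    intro c _
    rw [pred_eq]
  simp only [hcnt]
  have hmap : ∀ (p : String → Bool), (cs.map pvSuffix).all p = cs.all (fun c => p (pvSuffix c)) := fun p => List.all_map
  by_cases hnil : cs = []
  · simp [hnil]
  · have hne : cs.isEmpty = false := by simp [List.isEmpty_eq_false_iff, hnil]
    have hlen : 0 < cs.length := List.length_pos_iff.mpr hnil
    simp only [hnil, if_false, issubset_SHSZ, isdisjoint_SHSZ, ofList_isEmpty,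
      List.isEmpty_map, hne, Bool.not_false, Bool.true_and, hmap]
    by_cases hall : cs.all (fun c => pvIsE (pvSuffix c)) = true
    · have hcount : cs.countP (fun c => pvIsE (pvSuffix c)) = cs.length :=
        List.countP_eq_length.mpr (List.all_eq_true.mp hall)
      have hpos : 0 < cs.countP (fun c => pvIsE (pvSuffix c)) := hcount ▸ hlen
      rw [if_pos hall, if_neg (by rw [hcount]; omega), if_pos (by exact_mod_cast hpos)]
      rfl
    · have h1 := eq_false_of_ne_true hall
      rw [List.all_eq_false] at h1
      obtain ⟨x, hx, hxe⟩ := h1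
      have hlt : cs.countP (fun c => pvIsE (pvSuffix c)) < cs.length := by
        apply lt_of_le_of_ne List.countP_le_length
        intro hEq
        exact hxe (List.countP_eq_length.mp hEq x hx)
      have hBlt : (cs.countP (fun c => pvIsE (pvSuffix c)) : Int) < (cs.length : Int) := by
        exact_mod_cast hlt
      rw [if_neg hall]
      by_cases hdis : cs.all (fun c => !pvIsE (pvSuffix c)) = true
      · have hz : cs.countP (fun c => pvIsE (pvSuffix c)) = 0 := by
          rw [List.countP_eq_zero]
          intro a ha
          have := List.all_eq_true.mp hdis a ha
          simp at this
          simp [this]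
        rw [if_pos hdis, if_pos hBlt, if_neg (by rw [hz]; omega)]
        simp
      · have h2 := eq_false_of_ne_true hdis
        rw [List.all_eq_false] at h2
        obtain ⟨y, hy, hye⟩ := h2
        have hyE : pvIsE (pvSuffix y) = true := by
          simpa using hye
        have h0 : cs.countP (fun c => pvIsE (pvSuffix c)) ≠ 0 := by
          intro h0
          have := List.countP_eq_zero.mp h0 y hy
          simp [hyE] at this
        have hpos : 0 < cs.countP (fun c => pvIsE (pvSuffix c)) := Nat.pos_of_ne_zero h0
        rw [if_neg hdis, if_pos hBlt, if_pos (by exact_mod_cast hpos)]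
        rfl
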